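-- pv_equiv track=rewrite | github.com/dimipash/python-algorithms | barcode_validator.py | validate_upc
-- ===== SOURCE A (Python) =====
-- def validate_upc(upc_code: str) -> bool:
--     """
--     Validate UPC-A barcode using standard checksum algorithm.
--
--     Args:
--         upc_code (str): 12-digit UPC code
--
--     Returns:
--         bool: True if valid UPC code
--
--     Examples:
--         >>> validate_upc("036000291452")
--         True
--         >>> validate_upc("036000291453")
--         False
--     """
--     # Input validation
--     if not upc_code.isdigit() or len(upc_code) != 12:
--         return False
--
--     # Calculate checksum
--     odd_sum = sum(int(upc_code[i]) for i in range(0, 11, 2))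
--     even_sum = sum(int(upc_code[i]) for i in range(1, 11, 2))
--     total = (odd_sum * 3) + even_sum
--
--     # Verify check digit
--     check_digit = (10 - (total % 10)) % 10
--     return check_digit == int(upc_code[-1])
-- ===== SOURCE B (Python) =====
-- def validate_upc(upc_code: str) -> bool:
--     # Same guard as the original, then one weighted pass + a divisibility test
--     if not upc_code.isdigit() or len(upc_code) != 12:
--         return False
--     total = 0
--     for i, ch in enumerate(upc_code):
--         total += (3 if i % 2 == 0 else 1) * int(ch)
--     return total % 10 == 0
-- ===== Notes on version B (the rewrite author's own statement) =====
-- stated objective: idiomatic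
-- what changed: Replaces the two strided range-sums plus the closed-form check-digit comparison by a single enumerate pass accumulating a 3/1-weighted total, returning total % 10 == 0.
import Mathlib
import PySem

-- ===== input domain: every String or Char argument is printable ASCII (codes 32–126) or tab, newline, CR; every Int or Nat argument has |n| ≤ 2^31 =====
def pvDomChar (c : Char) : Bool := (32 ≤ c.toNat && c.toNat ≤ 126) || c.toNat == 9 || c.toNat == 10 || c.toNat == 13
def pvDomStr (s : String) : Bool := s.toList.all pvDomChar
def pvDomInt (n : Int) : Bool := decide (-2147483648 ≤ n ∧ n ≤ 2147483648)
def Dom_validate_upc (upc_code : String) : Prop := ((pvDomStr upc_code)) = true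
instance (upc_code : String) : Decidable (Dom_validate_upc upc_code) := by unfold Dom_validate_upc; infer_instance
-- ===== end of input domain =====

-- B replaces A's two strided range-sums and closed-form check digit by one weighted
-- enumerate pass and a divisibility test (objective: idiomatic).

-- int(ch) for a single character; exact whenever isdigit ch holds (both ports only
-- apply it under the isdigit guard)
def pvDigitInt (c : Char) : Int := (c.toNat : Int) - 48

-- ===== PORT A =====
def validate_upc (upc_code : String) : Bool :=
  if !PySem.Str.strIsdigit upc_code || (PySem.Str.len upc_code != 12) then false
  else
    let odd_sum := (PySem.List.pyRange 0 11 2).foldl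
      (fun acc i => acc + pvDigitInt (PySem.List.pyGetD upc_code.toList i '0')) 0
    let even_sum := (PySem.List.pyRange 1 11 2).foldl
      (fun acc i => acc + pvDigitInt (PySem.List.pyGetD upc_code.toList i '0')) 0
    let total := odd_sum * 3 + even_sum
    let check_digit := PySem.Int.mod (10 - PySem.Int.mod total 10) 10
    check_digit == pvDigitInt (PySem.List.pyGetD upc_code.toList (-1) '0')

-- ===== PORT B =====
def validate_upc_alt (upc_code : String) : Bool :=
  if !PySem.Str.strIsdigit upc_code || (PySem.Str.len upc_code != 12) then false
  else
    let total := (PySem.List.enumerate upc_code.toList 0).foldl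
      (fun acc p => acc + (if PySem.Int.mod p.1 2 == 0 then 3 else 1) * pvDigitInt p.2) 0
    PySem.Int.mod total 10 == 0

-- ===== PRECONDITION & SPEC =====
def Spec_validate_upc (upc_code : String) (out : Bool) : Prop := out = validate_upc_alt upc_code
instance (upc_code : String) (out : Bool) : Decidable (Spec_validate_upc upc_code out) := by unfold Spec_validate_upc; infer_instance

-- ===== CLAIM (what is proved, stated in full; the proofs are below) =====
def Claim_equal_validate_upc : Prop := ∀ (upc_code : String), Dom_validate_upc upc_code → Spec_validate_upc upc_code (validate_upc upc_code)

-- ===== LEMMAS AND PROOFS =====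

theorem digit_bounds {c : Char} (h : PySem.Chars.isdigit c = true) :
    48 ≤ (c.toNat : Int) ∧ (c.toNat : Int) ≤ 57 := by
  simp only [PySem.Chars.isdigit, Bool.and_eq_true, decide_eq_true_eq, Char.le_def,
    UInt32.le_iff_toNat_le, Char.toNat] at h ⊢
  have h0 : '0'.val.toNat = 48 := rfl
  have h9 : '9'.val.toNat = 57 := rfl
  rw [h0, h9] at h
  omega

theorem list_len12 {α : Type} (l : List α) (h : l.length = 12) :
    ∃ a b c d e f g h' i j k m, l = [a,b,c,d,e,f,g,h',i,j,k,m] := by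
  match l, h with
  | [a,b,c,d,e,f,g,h',i,j,k,m], _ => exact ⟨a,b,c,d,e,f,g,h',i,j,k,m, rfl⟩

theorem validate_upc_spec : Claim_equal_validate_upc := by
  intro s _
  unfold Spec_validate_upc validate_upc validate_upc_alt
  cases hd : PySem.Str.strIsdigit s with
  | false => rw [if_pos (by simp [hd]), if_pos (by simp [hd])]
  | true =>
    by_cases hl : PySem.Str.len s = 12
    · have hlen' : s.toList.length = 12 := by
        simp only [PySem.Str.len_eq] at hl; exact_mod_cast hl
      rw [if_neg (by simp [PySem.Str.len_eq, hlen']), if_neg (by simp [PySem.Str.len_eq, hlen'])]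
      simp only [PySem.Str.strIsdigit, PySem.Chars.strIsdigit, Bool.and_eq_true,
        List.all_eq_true] at hd
      obtain ⟨-, hall⟩ := hd
      obtain ⟨c0,c1,c2,c3,c4,c5,c6,c7,c8,c9,c10,c11,hls⟩ := list_len12 s.toList hlen'
      rw [hls] at hall
      have b0 := digit_bounds (hall c0 (by simp))
      have b1 := digit_bounds (hall c1 (by simp))
      have b2 := digit_bounds (hall c2 (by simp))
      have b3 := digit_bounds (hall c3 (by simp))
      have b4 := digit_bounds (hall c4 (by simp))
      have b5 := digit_bounds (hall c5 (by simp))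
      have b6 := digit_bounds (hall c6 (by simp))
      have b7 := digit_bounds (hall c7 (by simp))
      have b8 := digit_bounds (hall c8 (by simp))
      have b9 := digit_bounds (hall c9 (by simp))
      have b10 := digit_bounds (hall c10 (by simp))
      have b11 := digit_bounds (hall c11 (by simp))
      rw [hls]
      have hr1 : PySem.List.pyRange 0 11 2 = [0, 2, 4, 6, 8, 10] := by decide
      have hr2 : PySem.List.pyRange 1 11 2 = [1, 3, 5, 7, 9] := by decide
      rw [hr1, hr2]
      norm_num [PySem.List.pyGetD, PySem.List.pyGet?, PySem.List.pyIdx?,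
        Int.toNat, List.getElem_cons_succ, List.getElem_cons_zero,
        PySem.List.enumerate, List.foldl, pvDigitInt,
        PySem.Int.mod, Int.fmod_eq_emod, beq_iff_eq, decide_eq_decide]
      omega
    · have hlI : ¬ ((s.length : Int) = 12) := by simpa [PySem.Str.len_eq] using hl
      rw [if_pos (by simp [PySem.Str.len_eq, hlI]), if_pos (by simp [PySem.Str.len_eq, hlI])]
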